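-- pv_equiv track=rewrite | github.com/Beliavsky/Pure-Fortran | xfix.py | _paren_delta
-- ===== SOURCE A (Python) =====
-- def _paren_delta(stmt: str) -> int:
--     depth = 0
--     in_single = False
--     in_double = False
--     i = 0
--     while i < len(stmt):
--         ch = stmt[i]
--         if ch == "'" and not in_double:
--             if in_single and i + 1 < len(stmt) and stmt[i + 1] == "'":
--                 i += 2
--                 continue
--             in_single = not in_single
--         elif ch == '"' and not in_single:
--             in_double = not in_double
--         elif not in_single and not in_double:
--             if ch == "(":
--                 depth += 1
--             elif ch == ")":
--                 depth -= 1
--         i += 1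
--     return depth
-- ===== SOURCE B (Python) =====
-- def _paren_delta(stmt: str) -> int:
--     # Segment-hopping: jump between quote positions with str.find and count
--     # parentheses on whole code slices with str.count (no per-character state machine).
--     depth = 0
--     rest = stmt
--     while True:
--         sq = rest.find("'")
--         dq = rest.find('"')
--         if sq == -1 and dq == -1:
--             return depth + rest.count("(") - rest.count(")")
--         if dq == -1 or (sq != -1 and sq < dq):
--             q, single = sq, True
--         else:
--             q, single = dq, False
--         seg = rest[:q]
--         depth += seg.count("(") - seg.count(")")
--         rest = rest[q + 1:]
--         if single:
--             while True:
--                 k = rest.find("'")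
--                 if k == -1:
--                     return depth  # unterminated string literal
--                 if rest[k + 1:k + 2] == "'":
--                     rest = rest[k + 2:]  # doubled '' escape, stay in string
--                 else:
--                     rest = rest[k + 1:]
--                     break
--         else:
--             k = rest.find('"')
--             if k == -1:
--                 return depth  # unterminated string literal
--             rest = rest[k + 1:]
-- ===== Notes on version B (the rewrite author's own statement) =====
-- stated objective: alternative
-- what changed: Replaces A's per-character loop with two boolean in-string flags and an inline depth counter by a segment-hopping scan: str.find jumps directly to the next quote character, parentheses are counted on whole code slices with str.count, and string literals (including the doubled '' escape) are skipped by repeated find jumps.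
import Mathlib
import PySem

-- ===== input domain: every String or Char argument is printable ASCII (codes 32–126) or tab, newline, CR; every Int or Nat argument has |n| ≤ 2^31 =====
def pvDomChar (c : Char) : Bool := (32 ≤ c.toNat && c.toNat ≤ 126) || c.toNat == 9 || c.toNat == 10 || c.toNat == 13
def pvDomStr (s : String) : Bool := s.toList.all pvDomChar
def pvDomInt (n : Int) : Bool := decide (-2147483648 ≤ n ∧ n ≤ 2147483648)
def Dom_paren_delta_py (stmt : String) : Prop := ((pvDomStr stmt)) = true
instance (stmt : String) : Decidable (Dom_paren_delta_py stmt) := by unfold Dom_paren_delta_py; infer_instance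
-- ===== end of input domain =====

-- B replaces A's per-character quote state machine with a segment-hopping scan:
-- str.find jumps from quote to quote and str.count counts parentheses on whole code
-- slices (objective: alternative algorithmic structure, same O(n) cost).


-- ===== PORT A =====
-- A's while loop over stmt[i] (with the i += 2 skip for a doubled single quote)
-- as the obvious structural recursion over the remaining characters.
def pvALoop : List Char → Bool → Bool → Int → Int
  | [], _, _, depth => depth
  | c :: cs, in_single, in_double, depth =>
    if c = '\'' ∧ in_double = false then
      if in_single = true ∧ cs.head? = some '\'' then pvALoop cs.tail in_single in_double depth
      else pvALoop cs (!in_single) in_double depth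
    else if c = '"' ∧ in_single = false then
      pvALoop cs in_single (!in_double) depth
    else if in_single = false ∧ in_double = false then
      if c = '(' then pvALoop cs in_single in_double (depth + 1)
      else if c = ')' then pvALoop cs in_single in_double (depth - 1)
      else pvALoop cs in_single in_double depth
    else pvALoop cs in_single in_double depth
  termination_by cs _ _ _ => cs.length

def paren_delta_py (stmt : String) : Int := pvALoop stmt.toList false false 0

-- ===== PORT B =====
-- Source B's inner skip loop over a single-quoted literal: rest.find("'") jumps to the
-- next quote (List.idxOf? is the corresponding Lean function: none = -1), a doubled
-- '' stays inside the string; none = unterminated literal (Source B returns depth there).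

-- termination facts for the two B-side loops (cited in their decreasing_by)
theorem pvSkipSingle_dec (cs : List Char) (h : (List.idxOf? '\'' cs).isSome) :
    ((cs.drop ((List.idxOf? '\'' cs).get h + 1)).tail).length < cs.length := by
  obtain ⟨hk, -, -⟩ := List.idxOf?_eq_some_iff.mp (Option.some_get h).symm
  simp only [List.length_tail, List.length_drop]
  omega

def pvSkipSingle (cs : List Char) : Option (List Char) :=
  if h : (List.idxOf? '\'' cs).isSome then
    let k := (List.idxOf? '\'' cs).get h
    if (cs.drop (k + 1)).head? = some '\'' then pvSkipSingle ((cs.drop (k + 1)).tail)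
    else some (cs.drop (k + 1))
  else none
  termination_by cs.length
  decreasing_by exact pvSkipSingle_dec cs h

-- needed by pvBLoop's termination proof (cited in its decreasing_by)
theorem pvSkipSingle_len (n : Nat) : ∀ (cs r : List Char), cs.length ≤ n →
    pvSkipSingle cs = some r → r.length ≤ cs.length := by
  induction n with
  | zero =>
    intro cs r hn h
    have : cs = [] := List.length_eq_zero_iff.mp (Nat.le_zero.mp hn)
    subst this
    rw [pvSkipSingle] at h
    simp at h
  | succ n ih =>
    intro cs r hn h
    rw [pvSkipSingle] at h
    by_cases hs : (List.idxOf? '\'' cs).isSome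
    · rw [dif_pos hs] at h
      obtain ⟨hk, -, -⟩ := List.idxOf?_eq_some_iff.mp (Option.some_get hs).symm
      by_cases hh : (cs.drop ((List.idxOf? '\'' cs).get hs + 1)).head? = some '\''
      · rw [if_pos hh] at h
        have := ih _ r (by simp only [List.length_tail, List.length_drop]; omega) h
        simp only [List.length_tail, List.length_drop] at this
        omega
      · rw [if_neg hh] at h
        injection h with h
        subst h
        simp only [List.length_drop]
        omega
    · rw [dif_neg hs] at h
      exact absurd h (by simp)

theorem pvSkipSingle_length_le (cs r : List Char) (h : pvSkipSingle cs = some r) :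
    r.length ≤ cs.length := pvSkipSingle_len cs.length cs r le_rfl h


theorem pvBLoop_dec_single (rest : List Char) (hs : (List.idxOf? '\'' rest).isSome)
    (hr : (pvSkipSingle (rest.drop ((List.idxOf? '\'' rest).get hs + 1))).isSome) :
    ((pvSkipSingle (rest.drop ((List.idxOf? '\'' rest).get hs + 1))).get hr).length < rest.length := by
  obtain ⟨hq, -, -⟩ := List.idxOf?_eq_some_iff.mp (Option.some_get hs).symm
  have h2 := pvSkipSingle_length_le _ _ (Option.some_get hr).symm
  simp only [List.length_drop] at h2
  omega

theorem pvBLoop_dec_double (rest : List Char) (hd : (List.idxOf? '"' rest).isSome)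
    (hk : (List.idxOf? '"' (rest.drop ((List.idxOf? '"' rest).get hd + 1))).isSome) :
    ((rest.drop ((List.idxOf? '"' rest).get hd + 1)).drop
      ((List.idxOf? '"' (rest.drop ((List.idxOf? '"' rest).get hd + 1))).get hk + 1)).length < rest.length := by
  obtain ⟨hq, -, -⟩ := List.idxOf?_eq_some_iff.mp (Option.some_get hd).symm
  simp only [List.length_drop]
  omega

-- Source B's outer while loop: rest.find("'") / rest.find('"') choose the nearer quote,
-- parentheses of the code slice before it are counted with str.count → PySem.List.count.
def pvBLoop (rest : List Char) (depth : Int) : Int :=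
  if hs : (List.idxOf? '\'' rest).isSome then
    if hd : (List.idxOf? '"' rest).isSome then
      if (List.idxOf? '\'' rest).get hs < (List.idxOf? '"' rest).get hd then
        -- single-quote branch
        let seg := rest.take ((List.idxOf? '\'' rest).get hs)
        let d2 := depth + (PySem.List.count seg '(' : Int) - (PySem.List.count seg ')' : Int)
        if hr : (pvSkipSingle (rest.drop ((List.idxOf? '\'' rest).get hs + 1))).isSome then
          pvBLoop ((pvSkipSingle (rest.drop ((List.idxOf? '\'' rest).get hs + 1))).get hr) d2
        else d2
      else
        -- double-quote branch
        let seg := rest.take ((List.idxOf? '"' rest).get hd)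
        let d2 := depth + (PySem.List.count seg '(' : Int) - (PySem.List.count seg ')' : Int)
        if hk : (List.idxOf? '"' (rest.drop ((List.idxOf? '"' rest).get hd + 1))).isSome then
          pvBLoop ((rest.drop ((List.idxOf? '"' rest).get hd + 1)).drop ((List.idxOf? '"' (rest.drop ((List.idxOf? '"' rest).get hd + 1))).get hk + 1)) d2
        else d2
    else
      let seg := rest.take ((List.idxOf? '\'' rest).get hs)
      let d2 := depth + (PySem.List.count seg '(' : Int) - (PySem.List.count seg ')' : Int)
      if hr : (pvSkipSingle (rest.drop ((List.idxOf? '\'' rest).get hs + 1))).isSome then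
        pvBLoop ((pvSkipSingle (rest.drop ((List.idxOf? '\'' rest).get hs + 1))).get hr) d2
      else d2
  else if hd : (List.idxOf? '"' rest).isSome then
    let seg := rest.take ((List.idxOf? '"' rest).get hd)
    let d2 := depth + (PySem.List.count seg '(' : Int) - (PySem.List.count seg ')' : Int)
    if hk : (List.idxOf? '"' (rest.drop ((List.idxOf? '"' rest).get hd + 1))).isSome then
      pvBLoop ((rest.drop ((List.idxOf? '"' rest).get hd + 1)).drop ((List.idxOf? '"' (rest.drop ((List.idxOf? '"' rest).get hd + 1))).get hk + 1)) d2
    else d2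
  else
    depth + (PySem.List.count rest '(' : Int) - (PySem.List.count rest ')' : Int)
  termination_by rest.length
  decreasing_by
  · exact pvBLoop_dec_single rest hs hr
  · exact pvBLoop_dec_double rest hd hk
  · exact pvBLoop_dec_single rest hs hr
  · exact pvBLoop_dec_double rest hd hk

def paren_delta_py_alt (stmt : String) : Int := pvBLoop stmt.toList 0

-- ===== PRECONDITION & SPEC =====
def Spec_paren_delta_py (stmt : String) (out : Int) : Prop := out = paren_delta_py_alt stmt
instance (stmt : String) (out : Int) : Decidable (Spec_paren_delta_py stmt out) := by unfold Spec_paren_delta_py; infer_instance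

-- ===== CLAIM (what is proved, stated in full; the proofs are below) =====
def Claim_equal_paren_delta_py : Prop := ∀ (stmt : String), Dom_paren_delta_py stmt → Spec_paren_delta_py stmt (paren_delta_py stmt)

-- ===== LEMMAS AND PROOFS =====

-- the two ports' loops rewritten as case splits on the find results.
theorem pvSkipSingle_match_eq (cs : List Char) :
    pvSkipSingle cs =
      match List.idxOf? '\'' cs with
      | none => none
      | some k =>
        if (cs.drop (k + 1)).head? = some '\'' then pvSkipSingle ((cs.drop (k + 1)).tail)
        else some (cs.drop (k + 1)) := by
  rw [pvSkipSingle]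
  cases h : List.idxOf? '\'' cs with
  | none => simp
  | some k => simp

theorem pvBLoop_match_eq (rest : List Char) (depth : Int) :
    pvBLoop rest depth =
      match List.idxOf? '\'' rest, List.idxOf? '"' rest with
      | none, none =>
        depth + (PySem.List.count rest '(' : Int) - (PySem.List.count rest ')' : Int)
      | some q, none =>
        let seg := rest.take q
        let d2 := depth + (PySem.List.count seg '(' : Int) - (PySem.List.count seg ')' : Int)
        match pvSkipSingle (rest.drop (q + 1)) with
        | none => d2
        | some r => pvBLoop r d2
      | none, some q =>
        let seg := rest.take q
        let d2 := depth + (PySem.List.count seg '(' : Int) - (PySem.List.count seg ')' : Int)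
        match List.idxOf? '"' (rest.drop (q + 1)) with
        | none => d2
        | some k => pvBLoop ((rest.drop (q + 1)).drop (k + 1)) d2
      | some s, some d =>
        if s < d then
          let seg := rest.take s
          let d2 := depth + (PySem.List.count seg '(' : Int) - (PySem.List.count seg ')' : Int)
          match pvSkipSingle (rest.drop (s + 1)) with
          | none => d2
          | some r => pvBLoop r d2
        else
          let seg := rest.take d
          let d2 := depth + (PySem.List.count seg '(' : Int) - (PySem.List.count seg ')' : Int)
          match List.idxOf? '"' (rest.drop (d + 1)) with
          | none => d2
          | some k => pvBLoop ((rest.drop (d + 1)).drop (k + 1)) d2 := by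
  rw [pvBLoop]
  cases h1 : List.idxOf? '\'' rest with
  | none =>
    cases h2 : List.idxOf? '"' rest with
    | none => simp
    | some q =>
      cases h3 : List.idxOf? '"' (rest.drop (q + 1)) with
      | none => simp [h3]
      | some k => simp [h3]
  | some s =>
    cases h2 : List.idxOf? '"' rest with
    | none =>
      cases h3 : pvSkipSingle (rest.drop (s + 1)) with
      | none => simp [h3]
      | some r => simp [h3]
    | some d =>
      by_cases hlt : s < d
      · cases h3 : pvSkipSingle (rest.drop (s + 1)) with
        | none => simp [hlt, h3]
        | some r => simp [hlt, h3]
      · cases h3 : List.idxOf? '"' (rest.drop (d + 1)) with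
        | none => simp [hlt, h3]
        | some k => simp [hlt, h3]

-- Source B's skip loop ignores a leading non-quote character.
theorem pvSkipSingle_cons_ne (c : Char) (l : List Char) (hc : c ≠ '\'') :
    pvSkipSingle (c :: l) = pvSkipSingle l := by
  rw [pvSkipSingle_match_eq, pvSkipSingle_match_eq]
  rw [List.idxOf?_cons, if_neg (by simp [hc])]
  cases hk : List.idxOf? '\'' l with
  | none => simp
  | some k => simp [List.drop_succ_cons]

-- A in single-quoted mode behaves like Source B's single-quote skip loop.
theorem pvA_single (n : Nat) : ∀ (cs : List Char), cs.length ≤ n → ∀ d,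
    pvALoop cs true false d =
      match pvSkipSingle cs with
      | none => d
      | some r => pvALoop r false false d := by
  induction n with
  | zero =>
    intro cs h d
    have : cs = [] := List.length_eq_zero_iff.mp (Nat.le_zero.mp h)
    subst this
    rw [pvSkipSingle_match_eq]
    simp [pvALoop]
  | succ n ih =>
    intro cs h d
    match cs with
    | [] => rw [pvSkipSingle_match_eq]; simp [pvALoop]
    | c :: cs' =>
      by_cases hc : c = '\''
      · subst hc
        by_cases hh : cs'.head? = some '\''
        · rw [pvALoop, if_pos ⟨rfl, rfl⟩, if_pos ⟨rfl, hh⟩]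
          rw [pvSkipSingle_match_eq, List.idxOf?_cons, if_pos (by simp)]
          simp only [List.drop_succ_cons, List.drop_zero, hh, if_true]
          have hlen : cs'.tail.length ≤ n := by
            simp only [List.length_cons] at h
            simp only [List.length_tail]
            omega
          exact ih cs'.tail hlen d
        · rw [pvALoop, if_pos ⟨rfl, rfl⟩, if_neg (by simp [hh])]
          rw [pvSkipSingle_match_eq, List.idxOf?_cons, if_pos (by simp)]
          simp only [List.drop_succ_cons, List.drop_zero, hh, if_false]
          simp
      · rw [pvALoop, if_neg (by simp [hc]), if_neg (by simp), if_neg (by simp)]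
        rw [pvSkipSingle_cons_ne c cs' hc]
        have hlen : cs'.length ≤ n := by simpa using Nat.lt_succ_iff.mp (by simpa using h)
        exact ih cs' hlen d

-- A in double-quoted mode behaves like Source B's double-quote skip.
theorem pvA_double (cs : List Char) : ∀ d,
    pvALoop cs false true d =
      match List.idxOf? '"' cs with
      | none => d
      | some k => pvALoop (cs.drop (k + 1)) false false d := by
  induction cs with
  | nil => intro d; simp [pvALoop]
  | cons c cs' ih =>
    intro d
    by_cases hc : c = '"'
    · subst hc
      rw [pvALoop, if_neg (by simp), if_pos ⟨rfl, rfl⟩]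
      rw [List.idxOf?_cons, if_pos (by simp)]
      simp [List.drop_succ_cons]
    · rw [pvALoop, if_neg (by simp), if_neg (by simp [hc]), if_neg (by simp)]
      rw [List.idxOf?_cons, if_neg (by simp [hc])]
      rw [ih d]
      cases hk : List.idxOf? '"' cs' with
      | none => simp
      | some k => simp [List.drop_succ_cons]

-- peeling one character off a counted slice.
theorem pvDelta_cons (c : Char) (seg : List Char) (dd : Int) :
    dd + (PySem.List.count (c :: seg) '(' : Int) - (PySem.List.count (c :: seg) ')' : Int)
    = (dd + (if c = '(' then 1 else if c = ')' then -1 else 0))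
      + (PySem.List.count seg '(' : Int) - (PySem.List.count seg ')' : Int) := by
  simp only [PySem.List.count_eq, List.count_cons]
  by_cases h1 : c = '('
  · subst h1; simp; ring
  · by_cases h2 : c = ')'
    · subst h2; simp [h1]; ring
    · simp [h1, h2]

-- B consumes a leading non-quote code character exactly like A does.
theorem pvBLoop_cons_code (c : Char) (l : List Char) (d : Int)
    (hs : c ≠ '\'') (hd : c ≠ '"') :
    pvBLoop (c :: l) d =
      pvBLoop l (d + (if c = '(' then 1 else if c = ')' then -1 else 0)) := by
  have e1 : List.idxOf? '\'' (c :: l) = (List.idxOf? '\'' l).map (· + 1) := by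
    rw [List.idxOf?_cons]; simp [hs]
  have e2 : List.idxOf? '"' (c :: l) = (List.idxOf? '"' l).map (· + 1) := by
    rw [List.idxOf?_cons]; simp [hd]
  rw [pvBLoop_match_eq, pvBLoop_match_eq, e1, e2]
  cases hk1 : List.idxOf? '\'' l with
  | none =>
    cases hk2 : List.idxOf? '"' l with
    | none =>
      simp only [Option.map_none]
      exact pvDelta_cons c l d
    | some k2 =>
      simp only [Option.map_none, Option.map_some]
      simp only [List.take_succ_cons, List.drop_succ_cons]
      rw [pvDelta_cons c (l.take k2) d]
  | some k1 =>
    cases hk2 : List.idxOf? '"' l with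
    | none =>
      simp only [Option.map_some, Option.map_none]
      simp only [List.take_succ_cons, List.drop_succ_cons]
      rw [pvDelta_cons c (l.take k1) d]
    | some k2 =>
      simp only [Option.map_some]
      by_cases hlt : k1 < k2
      · simp only [show (k1 + 1 < k2 + 1) = (k1 < k2) by simp, hlt, if_true]
        simp only [List.take_succ_cons, List.drop_succ_cons]
        rw [pvDelta_cons c (l.take k1) d]
      · simp only [show (k1 + 1 < k2 + 1) = (k1 < k2) by simp, hlt, if_false]
        simp only [List.take_succ_cons, List.drop_succ_cons]
        rw [pvDelta_cons c (l.take k2) d]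

-- main invariant: in code mode A's fused counter equals B's segment hopping.
theorem pvAB (n : Nat) : ∀ (cs : List Char), cs.length ≤ n → ∀ d,
    pvALoop cs false false d = pvBLoop cs d := by
  induction n with
  | zero =>
    intro cs h d
    have : cs = [] := List.length_eq_zero_iff.mp (Nat.le_zero.mp h)
    subst this
    rw [pvBLoop_match_eq]
    simp [pvALoop, PySem.List.count_eq]
  | succ n ih =>
    intro cs h d
    match cs with
    | [] => rw [pvBLoop_match_eq]; simp [pvALoop, PySem.List.count_eq]
    | c :: cs' =>
      have hlen : cs'.length ≤ n := by simp only [List.length_cons] at h; omega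
      by_cases hq : c = '\''
      · subst hq
        rw [pvALoop, if_pos ⟨rfl, rfl⟩, if_neg (by simp)]
        simp only [Bool.not_false]
        rw [pvA_single cs'.length cs' le_rfl d]
        have e1 : List.idxOf? '\'' ('\'' :: cs') = some 0 := by
          rw [List.idxOf?_cons]; simp
        have e2 : List.idxOf? '"' ('\'' :: cs') = (List.idxOf? '"' cs').map (· + 1) := by
          rw [List.idxOf?_cons]; simp
        rw [pvBLoop_match_eq, e1, e2]
        cases hk2 : List.idxOf? '"' cs' with
        | none =>
          simp only [Option.map_none, List.take_zero, List.drop_succ_cons, List.drop_zero]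
          cases hr : pvSkipSingle cs' with
          | none => simp [PySem.List.count_eq]
          | some r =>
            have := pvSkipSingle_length_le cs' r hr
            simp [PySem.List.count_eq, ih r (by omega) d]
        | some k2 =>
          simp only [Option.map_some, Nat.succ_pos,
            List.take_zero, List.drop_succ_cons, List.drop_zero]
          cases hr : pvSkipSingle cs' with
          | none => simp [PySem.List.count_eq]
          | some r =>
            have := pvSkipSingle_length_le cs' r hr
            simp [PySem.List.count_eq, ih r (by omega) d]
      · by_cases hq2 : c = '"'
        · subst hq2
          rw [pvALoop, if_neg (by simp), if_pos ⟨rfl, rfl⟩]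
          simp only [Bool.not_false]
          rw [pvA_double cs' d]
          have e1 : List.idxOf? '\'' ('"' :: cs') = (List.idxOf? '\'' cs').map (· + 1) := by
            rw [List.idxOf?_cons]; simp
          have e2 : List.idxOf? '"' ('"' :: cs') = some 0 := by
            rw [List.idxOf?_cons]; simp
          rw [pvBLoop_match_eq, e1, e2]
          cases hk1 : List.idxOf? '\'' cs' with
          | none =>
            simp only [Option.map_none, List.take_zero, List.drop_succ_cons, List.drop_zero]
            cases hk : List.idxOf? '"' cs' with
            | none => simp [PySem.List.count_eq]
            | some k =>
              simp [PySem.List.count_eq,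
                ih (cs'.drop (k + 1)) (by simp only [List.length_drop]; omega) d]
          | some k1 =>
            simp only [Option.map_some, Nat.not_lt_zero,
              List.take_zero, List.drop_succ_cons, List.drop_zero]
            cases hk : List.idxOf? '"' cs' with
            | none => simp [PySem.List.count_eq]
            | some k =>
              simp [PySem.List.count_eq,
                ih (cs'.drop (k + 1)) (by simp only [List.length_drop]; omega) d]
        · rw [pvBLoop_cons_code c cs' d hq hq2]
          by_cases hp : c = '('
          · subst hp
            rw [pvALoop, if_neg (by simp), if_neg (by simp [hq2]), if_pos ⟨rfl, rfl⟩,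
              if_pos rfl]
            rw [ih cs' hlen (d + 1)]
            norm_num
          · by_cases hp2 : c = ')'
            · subst hp2
              rw [pvALoop, if_neg (by simp), if_neg (by simp [hq2]), if_pos ⟨rfl, rfl⟩,
                if_neg (by simp), if_pos rfl]
              rw [ih cs' hlen (d - 1)]
              simp only [hp, if_false]
              congr 1
            · rw [pvALoop, if_neg (by simp [hq]), if_neg (by simp [hq2]), if_pos ⟨rfl, rfl⟩,
                if_neg hp, if_neg hp2]
              rw [ih cs' hlen d]
              simp [hp, hp2]

-- ===== VERDICT (by name: the statement is the Claim_ definition above) =====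
theorem paren_delta_py_spec : Claim_equal_paren_delta_py := by
  intro stmt _
  unfold Spec_paren_delta_py paren_delta_py paren_delta_py_alt
  exact pvAB stmt.toList.length stmt.toList le_rfl 0
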